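-- pv_equiv track=rewrite | github.com/MPlbn/JSP2020 | Lista5/Zadanie3.py | odejmowanie
-- ===== SOURCE A (Python) =====
-- def odejmowanie(x,y):
--     for i in range(len(x) - 1):
--         if(x[i] == 'I' and (x[i+1] == 'M' or x[i+1] == 'D' or x[i+1] == 'C' or x[i+1] == 'L' or x[i+1] == 'X' or x[i+1] == 'V')):
--             y -= 1 * 2
--         elif(x[i] == 'V' and (x[i+1] == 'M' or x[i+1] == 'D' or x[i+1] == 'C' or x[i+1] == 'L' or x[i+1] == 'X')):
--             y -= 5 * 2
--         elif(x[i] == 'X' and (x[i+1] == 'M' or x[i+1] == 'D' or x[i+1] == 'C' or x[i+1] == 'L')):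
--             y -= 10 * 2
--         elif(x[i] == 'L' and (x[i+1] == 'M' or x[i+1] == 'D' or x[i+1] == 'C')):
--             y -= 50 * 2
--         elif(x[i] == 'C' and (x[i+1] == 'M' or x[i+1] == 'D')):
--             y -= 100 * 2
--         elif(x[i] == 'D' and (x[i+1] == 'M')):
--             y -= 500 * 2
--     return y
-- ===== SOURCE B (Python) =====
-- PAIRS = (("IV", 1), ("IX", 1), ("IL", 1), ("IC", 1), ("ID", 1), ("IM", 1),
--          ("VX", 5), ("VL", 5), ("VC", 5), ("VD", 5), ("VM", 5),
--          ("XL", 10), ("XC", 10), ("XD", 10), ("XM", 10),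
--          ("LC", 50), ("LD", 50), ("LM", 50),
--          ("CD", 100), ("CM", 100),
--          ("DM", 500))
--
-- def odejmowanie(x, y):
--     for pat, v in PAIRS:
--         y -= 2 * v * x.count(pat)
--     return y
-- ===== Notes on version B (the rewrite author's own statement) =====
-- stated objective: faster
-- what changed: Instead of A's per-character Python loop over adjacent positions with a six-branch elif chain, B iterates over the 21 subtractive two-letter patterns and subtracts 2*value times the substring count of each pattern (non-overlapping str.count is exact here because each pattern's two letters differ).
import Mathlib
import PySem

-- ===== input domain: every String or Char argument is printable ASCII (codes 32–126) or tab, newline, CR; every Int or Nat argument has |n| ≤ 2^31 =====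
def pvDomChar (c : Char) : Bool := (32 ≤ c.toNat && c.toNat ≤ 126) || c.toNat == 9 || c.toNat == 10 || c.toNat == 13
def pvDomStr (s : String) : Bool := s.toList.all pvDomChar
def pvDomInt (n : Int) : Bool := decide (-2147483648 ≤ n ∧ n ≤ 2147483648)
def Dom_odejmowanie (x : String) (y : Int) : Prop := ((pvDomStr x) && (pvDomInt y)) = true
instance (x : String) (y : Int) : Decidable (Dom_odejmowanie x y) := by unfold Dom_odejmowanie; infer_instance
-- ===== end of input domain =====

-- B replaces A's per-character index loop over adjacent positions (six-branch elif chain) by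
-- iterating over the 21 subtractive two-letter patterns and subtracting 2*value per substring
-- occurrence (objective: faster, measured constant-factor); same return value on every input.

-- ===== PORT A =====
-- the body of A's for-loop (the six-branch elif chain), named for readability
def pvStepA (acc : Int) (a b : Char) : Int :=
  if a = 'I' ∧ (b = 'M' ∨ b = 'D' ∨ b = 'C' ∨ b = 'L' ∨ b = 'X' ∨ b = 'V') then acc - 1 * 2
  else if a = 'V' ∧ (b = 'M' ∨ b = 'D' ∨ b = 'C' ∨ b = 'L' ∨ b = 'X') then acc - 5 * 2
  else if a = 'X' ∧ (b = 'M' ∨ b = 'D' ∨ b = 'C' ∨ b = 'L') then acc - 10 * 2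
  else if a = 'L' ∧ (b = 'M' ∨ b = 'D' ∨ b = 'C') then acc - 50 * 2
  else if a = 'C' ∧ (b = 'M' ∨ b = 'D') then acc - 100 * 2
  else if a = 'D' ∧ b = 'M' then acc - 500 * 2
  else acc

-- x[i] / x[i+1] are always in range for i ∈ range(len(x)-1), so the ' ' default is never used
def odejmowanie (x : String) (y : Int) : Int :=
  (PySem.List.pyRange 0 ((x.toList.length : Int) - 1) 1).foldl
    (fun acc i => pvStepA acc (PySem.List.pyGetD x.toList i ' ')
                             (PySem.List.pyGetD x.toList (i + 1) ' ')) y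

-- ===== PORT B =====
-- the module-level PAIRS table of Source B: the 21 subtractive patterns with the value of the first letter
def pvPAIRS : List (String × Int) :=
  [("IV", 1), ("IX", 1), ("IL", 1), ("IC", 1), ("ID", 1), ("IM", 1),
   ("VX", 5), ("VL", 5), ("VC", 5), ("VD", 5), ("VM", 5),
   ("XL", 10), ("XC", 10), ("XD", 10), ("XM", 10),
   ("LC", 50), ("LD", 50), ("LM", 50),
   ("CD", 100), ("CM", 100),
   ("DM", 500)]

def odejmowanie_alt (x : String) (y : Int) : Int :=
  pvPAIRS.foldl (fun acc p => acc - 2 * p.2 * (PySem.Str.count x p.1 : Int)) y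

-- ===== PRECONDITION & SPEC =====
def Spec_odejmowanie (x : String) (y : Int) (out : Int) : Prop := out = odejmowanie_alt x y
instance (x : String) (y : Int) (out : Int) : Decidable (Spec_odejmowanie x y out) := by unfold Spec_odejmowanie; infer_instance

-- ===== CLAIM =====
def Claim_equal_odejmowanie : Prop := ∀ (x : String) (y : Int), Dom_odejmowanie x y → Spec_odejmowanie x y (odejmowanie x y)

-- ===== LEMMAS AND PROOFS =====

-- the weight A subtracts for the adjacent pair (a, b), as the same if-chain
def pvW (p : Char × Char) : Int :=
  if p.1 = 'I' ∧ (p.2 = 'M' ∨ p.2 = 'D' ∨ p.2 = 'C' ∨ p.2 = 'L' ∨ p.2 = 'X' ∨ p.2 = 'V') then 1 * 2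
  else if p.1 = 'V' ∧ (p.2 = 'M' ∨ p.2 = 'D' ∨ p.2 = 'C' ∨ p.2 = 'L' ∨ p.2 = 'X') then 5 * 2
  else if p.1 = 'X' ∧ (p.2 = 'M' ∨ p.2 = 'D' ∨ p.2 = 'C' ∨ p.2 = 'L') then 10 * 2
  else if p.1 = 'L' ∧ (p.2 = 'M' ∨ p.2 = 'D' ∨ p.2 = 'C') then 50 * 2
  else if p.1 = 'C' ∧ (p.2 = 'M' ∨ p.2 = 'D') then 100 * 2
  else if p.1 = 'D' ∧ p.2 = 'M' then 500 * 2
  else 0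

theorem pvStepA_eq (acc : Int) (a b : Char) : pvStepA acc a b = acc - pvW (a, b) := by
  simp only [pvStepA, pvW]
  split_ifs <;> ring

theorem pvRangeA (cs : List Char) (y : Int) :
    (List.range (cs.length - 1)).foldl
      (fun acc k => pvStepA acc (cs.getD k ' ') (cs.getD (k + 1) ' ')) y
    = y - ((cs.zip cs.tail).map pvW).sum := by
  induction cs generalizing y with
  | nil => simp
  | cons c1 t ih =>
    cases t with
    | nil => simp
    | cons c2 rest =>
      have hlen : (c1 :: c2 :: rest).length - 1 = rest.length + 1 := by simp
      rw [hlen, List.range_succ_eq_map]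
      simp only [List.foldl_cons, List.foldl_map, List.getD_cons_zero, List.getD_cons_succ]
      have := ih (y := pvStepA y c1 c2)
      simp only [List.length_cons, Nat.add_sub_cancel, List.getD_cons_succ] at this
      rw [this, pvStepA_eq]
      simp [List.zip]
      omega

-- A two-letter pattern with distinct letters cannot overlap itself, so Python's
-- non-overlapping substring count is exactly the number of matching adjacent pairs.
theorem pvCountGo (a b : Char) (h : a ≠ b) :
    ∀ (fuel : Nat) (l : List Char) (acc : Nat), l.length ≤ fuel →
      PySem.Chars.count.go [a, b] fuel l acc
        = acc + List.countP (fun q => decide (q = (a, b))) (l.zip l.tail) := by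
  intro fuel
  induction fuel with
  | zero =>
    intro l acc hl
    have : l = [] := List.eq_nil_of_length_eq_zero (Nat.le_zero.mp hl)
    subst this
    rw [PySem.Chars.count.go]
    simp
  | succ n ih =>
    intro l acc hl
    match l with
    | [] => rw [PySem.Chars.count.go] <;> simp
    | [c] =>
      rw [PySem.Chars.count.go]
      simp [List.isPrefixOf]
      cases n <;> rw [PySem.Chars.count.go] <;> simp
    | c :: d :: t =>
      rw [PySem.Chars.count.go]
      by_cases hp : List.isPrefixOf [a, b] (c :: d :: t) = true
      · simp only [hp, if_true]
        simp only [List.isPrefixOf, Bool.and_true, Bool.and_eq_true, beq_iff_eq] at hp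
        obtain ⟨rfl, rfl⟩ : a = c ∧ b = d := hp
        have hdrop : List.drop [a, b].length (a :: b :: t) = t := rfl
        have ht : t.length ≤ n := by simp at hl; omega
        rw [hdrop, ih t (acc + 1) ht]
        cases t with
        | nil => simp
        | cons e t' =>
          have hne : ¬ ((b, e) = (a, b)) := by
            intro hq
            exact h (by injection hq with h1 h2; exact h1.symm)
          simp [hne]
          omega
      · simp only [hp]
        have ht : (d :: t).length ≤ n := by simp at hl ⊢; omega
        rw [ih (d :: t) acc ht]
        have hne : ¬ ((c, d) = (a, b)) := by
          simp [List.isPrefixOf] at hp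
          intro hq
          injection hq with h1 h2
          exact absurd (hp h1.symm) (by simp [h2.symm])
        simp [hne]

theorem pvCount2 (a b : Char) (h : a ≠ b) (l : List Char) :
    PySem.Chars.count l [a, b]
      = List.countP (fun q => decide (q = (a, b))) (l.zip l.tail) := by
  unfold PySem.Chars.count
  simp only [List.isEmpty_cons, if_false, Bool.false_eq_true]
  simpa using pvCountGo a b h l.length l 0 (le_refl _)

-- pointwise: the weight of a pair is the sum of its indicator contributions over the table
set_option maxHeartbeats 1000000 in
theorem pvW_tab (a b : Char) :
    pvW (a, b)
      = (if (a, b) = ('I','V') then 2*1 else 0)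
      + (if (a, b) = ('I','X') then 2*1 else 0)
      + (if (a, b) = ('I','L') then 2*1 else 0)
      + (if (a, b) = ('I','C') then 2*1 else 0)
      + (if (a, b) = ('I','D') then 2*1 else 0)
      + (if (a, b) = ('I','M') then 2*1 else 0)
      + (if (a, b) = ('V','X') then 2*5 else 0)
      + (if (a, b) = ('V','L') then 2*5 else 0)
      + (if (a, b) = ('V','C') then 2*5 else 0)
      + (if (a, b) = ('V','D') then 2*5 else 0)
      + (if (a, b) = ('V','M') then 2*5 else 0)
      + (if (a, b) = ('X','L') then 2*10 else 0)
      + (if (a, b) = ('X','C') then 2*10 else 0)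
      + (if (a, b) = ('X','D') then 2*10 else 0)
      + (if (a, b) = ('X','M') then 2*10 else 0)
      + (if (a, b) = ('L','C') then 2*50 else 0)
      + (if (a, b) = ('L','D') then 2*50 else 0)
      + (if (a, b) = ('L','M') then 2*50 else 0)
      + (if (a, b) = ('C','D') then 2*100 else 0)
      + (if (a, b) = ('C','M') then 2*100 else 0)
      + (if (a, b) = ('D','M') then 2*500 else 0) := by
  by_cases h1 : a = 'I' ∧ (b = 'M' ∨ b = 'D' ∨ b = 'C' ∨ b = 'L' ∨ b = 'X' ∨ b = 'V')
  · obtain ⟨rfl, hb⟩ := h1; rcases hb with rfl|rfl|rfl|rfl|rfl|rfl <;> decide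
  ·
    by_cases h2 : a = 'V' ∧ (b = 'M' ∨ b = 'D' ∨ b = 'C' ∨ b = 'L' ∨ b = 'X')
    · obtain ⟨rfl, hb⟩ := h2; rcases hb with rfl|rfl|rfl|rfl|rfl <;> decide
    ·
      by_cases h3 : a = 'X' ∧ (b = 'M' ∨ b = 'D' ∨ b = 'C' ∨ b = 'L')
      · obtain ⟨rfl, hb⟩ := h3; rcases hb with rfl|rfl|rfl|rfl <;> decide
      ·
        by_cases h4 : a = 'L' ∧ (b = 'M' ∨ b = 'D' ∨ b = 'C')
        · obtain ⟨rfl, hb⟩ := h4; rcases hb with rfl|rfl|rfl <;> decide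
        ·
          by_cases h5 : a = 'C' ∧ (b = 'M' ∨ b = 'D')
          · obtain ⟨rfl, hb⟩ := h5; rcases hb with rfl|rfl <;> decide
          ·
            by_cases h6 : a = 'D' ∧ b = 'M'
            · obtain ⟨rfl, rfl⟩ := h6; decide
            ·
              have k : ∀ (c d : Char) (v : Int), ¬(a = c ∧ b = d) → (if (a, b) = (c, d) then v else 0) = 0 := by
                intro c d v hn
                rw [if_neg]
                intro hq
                exact hn ⟨congrArg Prod.fst hq, congrArg Prod.snd hq⟩
              rw [k 'I' 'V' _ (fun hc => h1 ⟨hc.1, Or.inr (Or.inr (Or.inr (Or.inr (Or.inr (hc.2)))))⟩),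
                  k 'I' 'X' _ (fun hc => h1 ⟨hc.1, Or.inr (Or.inr (Or.inr (Or.inr (Or.inl hc.2))))⟩),
                  k 'I' 'L' _ (fun hc => h1 ⟨hc.1, Or.inr (Or.inr (Or.inr (Or.inl hc.2)))⟩),
                  k 'I' 'C' _ (fun hc => h1 ⟨hc.1, Or.inr (Or.inr (Or.inl hc.2))⟩),
                  k 'I' 'D' _ (fun hc => h1 ⟨hc.1, Or.inr (Or.inl hc.2)⟩),
                  k 'I' 'M' _ (fun hc => h1 ⟨hc.1, Or.inl hc.2⟩),
                  k 'V' 'X' _ (fun hc => h2 ⟨hc.1, Or.inr (Or.inr (Or.inr (Or.inr (hc.2))))⟩),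
                  k 'V' 'L' _ (fun hc => h2 ⟨hc.1, Or.inr (Or.inr (Or.inr (Or.inl hc.2)))⟩),
                  k 'V' 'C' _ (fun hc => h2 ⟨hc.1, Or.inr (Or.inr (Or.inl hc.2))⟩),
                  k 'V' 'D' _ (fun hc => h2 ⟨hc.1, Or.inr (Or.inl hc.2)⟩),
                  k 'V' 'M' _ (fun hc => h2 ⟨hc.1, Or.inl hc.2⟩),
                  k 'X' 'L' _ (fun hc => h3 ⟨hc.1, Or.inr (Or.inr (Or.inr (hc.2)))⟩),
                  k 'X' 'C' _ (fun hc => h3 ⟨hc.1, Or.inr (Or.inr (Or.inl hc.2))⟩),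
                  k 'X' 'D' _ (fun hc => h3 ⟨hc.1, Or.inr (Or.inl hc.2)⟩),
                  k 'X' 'M' _ (fun hc => h3 ⟨hc.1, Or.inl hc.2⟩),
                  k 'L' 'C' _ (fun hc => h4 ⟨hc.1, Or.inr (Or.inr (hc.2))⟩),
                  k 'L' 'D' _ (fun hc => h4 ⟨hc.1, Or.inr (Or.inl hc.2)⟩),
                  k 'L' 'M' _ (fun hc => h4 ⟨hc.1, Or.inl hc.2⟩),
                  k 'C' 'D' _ (fun hc => h5 ⟨hc.1, Or.inr (hc.2)⟩),
                  k 'C' 'M' _ (fun hc => h5 ⟨hc.1, Or.inl hc.2⟩),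
                  k 'D' 'M' _ (fun hc => h6 ⟨hc.1, hc.2⟩)]
              simp only [pvW]
              rw [if_neg h1, if_neg h2, if_neg h3, if_neg h4, if_neg h5, if_neg h6]
              norm_num

-- sum the weights pair-by-pair against the 21 per-pattern counts
theorem pvSum (pl : List (Char × Char)) :
    (pl.map pvW).sum =
      2*1 * (List.countP (fun q => decide (q = ('I','V'))) pl : Int)
      + 2*1 * (List.countP (fun q => decide (q = ('I','X'))) pl : Int)
      + 2*1 * (List.countP (fun q => decide (q = ('I','L'))) pl : Int)
      + 2*1 * (List.countP (fun q => decide (q = ('I','C'))) pl : Int)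
      + 2*1 * (List.countP (fun q => decide (q = ('I','D'))) pl : Int)
      + 2*1 * (List.countP (fun q => decide (q = ('I','M'))) pl : Int)
      + 2*5 * (List.countP (fun q => decide (q = ('V','X'))) pl : Int)
      + 2*5 * (List.countP (fun q => decide (q = ('V','L'))) pl : Int)
      + 2*5 * (List.countP (fun q => decide (q = ('V','C'))) pl : Int)
      + 2*5 * (List.countP (fun q => decide (q = ('V','D'))) pl : Int)
      + 2*5 * (List.countP (fun q => decide (q = ('V','M'))) pl : Int)
      + 2*10 * (List.countP (fun q => decide (q = ('X','L'))) pl : Int)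
      + 2*10 * (List.countP (fun q => decide (q = ('X','C'))) pl : Int)
      + 2*10 * (List.countP (fun q => decide (q = ('X','D'))) pl : Int)
      + 2*10 * (List.countP (fun q => decide (q = ('X','M'))) pl : Int)
      + 2*50 * (List.countP (fun q => decide (q = ('L','C'))) pl : Int)
      + 2*50 * (List.countP (fun q => decide (q = ('L','D'))) pl : Int)
      + 2*50 * (List.countP (fun q => decide (q = ('L','M'))) pl : Int)
      + 2*100 * (List.countP (fun q => decide (q = ('C','D'))) pl : Int)
      + 2*100 * (List.countP (fun q => decide (q = ('C','M'))) pl : Int)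
      + 2*500 * (List.countP (fun q => decide (q = ('D','M'))) pl : Int) := by
  induction pl with
  | nil => simp
  | cons p rest ih =>
    obtain ⟨a, b⟩ := p
    simp only [List.map_cons, List.sum_cons, List.countP_cons, decide_eq_true_eq, ih, pvW_tab a b]
    push_cast [apply_ite (fun n : ℕ => (n : ℤ))]
    simp only [mul_add, mul_ite, mul_one, mul_zero]
    ring

theorem odejmowanie_eq (x : String) (y : Int) : odejmowanie x y = odejmowanie_alt x y := by
  unfold odejmowanie odejmowanie_alt
  rw [PySem.List.pyRange_one]
  have h2 : ((x.toList.length : Int) - 1 - 0).toNat = x.toList.length - 1 := by omega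
  rw [h2, List.foldl_map]
  have hc : ∀ k : Nat, ((k : Int) + 1) = ((k + 1 : Nat) : Int) := by intro k; push_cast; ring
  simp only [hc, PySem.List.pyGetD_natCast, zero_add]
  rw [pvRangeA x.toList y]
  simp only [pvPAIRS, List.foldl_cons, List.foldl_nil, PySem.Str.count_eq]
  rw [show ("IV" : String).toList = ['I','V'] from rfl, pvCount2 'I' 'V' (by decide)]
  rw [show ("IX" : String).toList = ['I','X'] from rfl, pvCount2 'I' 'X' (by decide)]
  rw [show ("IL" : String).toList = ['I','L'] from rfl, pvCount2 'I' 'L' (by decide)]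
  rw [show ("IC" : String).toList = ['I','C'] from rfl, pvCount2 'I' 'C' (by decide)]
  rw [show ("ID" : String).toList = ['I','D'] from rfl, pvCount2 'I' 'D' (by decide)]
  rw [show ("IM" : String).toList = ['I','M'] from rfl, pvCount2 'I' 'M' (by decide)]
  rw [show ("VX" : String).toList = ['V','X'] from rfl, pvCount2 'V' 'X' (by decide)]
  rw [show ("VL" : String).toList = ['V','L'] from rfl, pvCount2 'V' 'L' (by decide)]
  rw [show ("VC" : String).toList = ['V','C'] from rfl, pvCount2 'V' 'C' (by decide)]
  rw [show ("VD" : String).toList = ['V','D'] from rfl, pvCount2 'V' 'D' (by decide)]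
  rw [show ("VM" : String).toList = ['V','M'] from rfl, pvCount2 'V' 'M' (by decide)]
  rw [show ("XL" : String).toList = ['X','L'] from rfl, pvCount2 'X' 'L' (by decide)]
  rw [show ("XC" : String).toList = ['X','C'] from rfl, pvCount2 'X' 'C' (by decide)]
  rw [show ("XD" : String).toList = ['X','D'] from rfl, pvCount2 'X' 'D' (by decide)]
  rw [show ("XM" : String).toList = ['X','M'] from rfl, pvCount2 'X' 'M' (by decide)]
  rw [show ("LC" : String).toList = ['L','C'] from rfl, pvCount2 'L' 'C' (by decide)]
  rw [show ("LD" : String).toList = ['L','D'] from rfl, pvCount2 'L' 'D' (by decide)]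
  rw [show ("LM" : String).toList = ['L','M'] from rfl, pvCount2 'L' 'M' (by decide)]
  rw [show ("CD" : String).toList = ['C','D'] from rfl, pvCount2 'C' 'D' (by decide)]
  rw [show ("CM" : String).toList = ['C','M'] from rfl, pvCount2 'C' 'M' (by decide)]
  rw [show ("DM" : String).toList = ['D','M'] from rfl, pvCount2 'D' 'M' (by decide)]
  rw [pvSum (x.toList.zip x.toList.tail)]
  push_cast
  ring

-- ===== VERDICT =====
theorem odejmowanie_spec : Claim_equal_odejmowanie := by
  intro x y _
  exact odejmowanie_eq x y
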